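-- pv_equiv track=rewrite | github.com/Manasyanrs/shop_app_fastAPI | shop_app/utils/case_converter.py | case_converter
-- ===== SOURCE A (Python) =====
-- def case_converter(class_name: str) -> str:
--     """
--     >>> case_converter("User")
--     "users"
--     >>> case_converter("UserProfile")
--     "user_profiles"
--     >>> case_converter("CUserProfile")
--     "c_user_profiles"
--     >>> case_converter("Cherry")
--     "cherries"
--     >>> case_converter("SOMESdk")
--     "some_sdks"
--     """
--     changed_class_name = ""
--     if class_name[-1] == "y":
--         changed_class_name = class_name[:-1] + "ies"
--     elif class_name[-1] == "s":
--         changed_class_name += class_name + "es"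
--     else:
--         changed_class_name = class_name + "s"
--
--     chars = []
--
--     for c_idx, char in enumerate(changed_class_name):
--         if c_idx and char.isupper():
--             nxt_idx = c_idx + 1
--             flag = nxt_idx >= len(class_name) or class_name[nxt_idx].isupper()
--             prev_char = class_name[c_idx - 1]
--             if prev_char.isupper() and flag:
--                 pass
--             else:
--                 chars.append("_")
--         chars.append(char.lower())
--     return "".join(chars)
-- ===== SOURCE B (Python) =====
-- import re
--
--
-- def case_converter(class_name: str) -> str:
--     # Two-pass regex CamelCase -> snake_case; plural suffix decided from the
--     # ORIGINAL last character (raises IndexError on "" just like the original).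
--     last = class_name[-1]
--     snake = re.sub(r'([^A-Z])([A-Z])', r'\1_\2', class_name)
--     snake = re.sub(r'([A-Z])([A-Z])(?=[^A-Z])', r'\1_\2', snake)
--     snake = snake.lower()
--     if last == "y":
--         return snake[:-1] + "ies"
--     if last == "s":
--         return snake + "es"
--     return snake + "s"
-- ===== Notes on version B (the rewrite author's own statement) =====
-- stated objective: idiomatic
-- what changed: A's single index-based loop over the suffixed string with positional lookups (class_name[c_idx-1], class_name[c_idx+1]) is replaced by the classic two-pass regex CamelCase-to-snake_case conversion (re.sub boundary insertion, then .lower()), with the plural suffix decided up front from the original last character.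
import Mathlib
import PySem

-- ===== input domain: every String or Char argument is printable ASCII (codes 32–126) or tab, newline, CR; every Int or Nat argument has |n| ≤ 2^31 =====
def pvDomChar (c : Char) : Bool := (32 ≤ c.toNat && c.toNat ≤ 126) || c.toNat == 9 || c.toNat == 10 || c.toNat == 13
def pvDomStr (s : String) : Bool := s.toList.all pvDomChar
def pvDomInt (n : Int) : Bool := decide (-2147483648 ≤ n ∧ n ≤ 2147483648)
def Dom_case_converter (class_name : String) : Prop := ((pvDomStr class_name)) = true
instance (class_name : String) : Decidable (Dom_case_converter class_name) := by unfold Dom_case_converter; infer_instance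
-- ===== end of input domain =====

-- B rewrites A's hand-rolled index loop as the classic two-pass regex CamelCase→snake_case
-- conversion (plural suffix decided from the original last character); objective: idiomatic.

-- ===== PORT A =====
-- Python appends one-character strings to `chars` and joins them; ported as a List Char
-- accumulator joined by String.ofList (exact: every appended piece is a single character).
def case_converter (class_name : String) : String :=
  let cs := class_name.toList
  let changed : List Char :=
    if PySem.List.pyGetD cs (-1) ' ' = 'y' then
      PySem.List.slice cs none (some (-1)) ++ ['i', 'e', 's']
    else if PySem.List.pyGetD cs (-1) ' ' = 's' then
      cs ++ ['e', 's']
    else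
      cs ++ ['s']
  let chars : List Char :=
    (PySem.List.enumerate changed 0).foldl
      (fun (acc : List Char) p =>
        if p.1 ≠ 0 ∧ PySem.Chars.isupper p.2 = true then
          let flag : Bool :=
            decide ((cs.length : Int) ≤ p.1 + 1) ||
              PySem.Chars.isupper (PySem.List.pyGetD cs (p.1 + 1) ' ')
          let prevChar := PySem.List.pyGetD cs (p.1 - 1) ' '
          if PySem.Chars.isupper prevChar && flag then
            acc ++ [PySem.Chars.lowerChar p.2]
          else
            acc ++ ['_', PySem.Chars.lowerChar p.2]
        else
          acc ++ [PySem.Chars.lowerChar p.2])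
      []
  String.ofList chars

-- ===== PORT B =====
-- hand port of re.sub(r'([^A-Z])([A-Z])', r'\1_\2', s): scan left to right, on a match
-- emit both matched chars with '_' between and resume AFTER the match (regex-exact).
def pvSub1 : List Char → List Char
  | [] => []
  | [c] => [c]
  | a :: b :: r =>
    if ¬ PySem.Chars.isupper a = true ∧ PySem.Chars.isupper b = true then
      a :: '_' :: b :: pvSub1 r
    else
      a :: pvSub1 (b :: r)

-- the lookahead (?=[^A-Z]) of the second regex: head of the rest exists and is not upper
def pvLookNonUp : List Char → Bool
  | c :: _ => !PySem.Chars.isupper c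
  | [] => false

-- hand port of re.sub(r'([A-Z])([A-Z])(?=[^A-Z])', r'\1_\2', s), same scanning rule
def pvSub2 : List Char → List Char
  | [] => []
  | [c] => [c]
  | a :: b :: r =>
    if PySem.Chars.isupper a = true ∧ PySem.Chars.isupper b = true ∧ pvLookNonUp r = true then
      a :: '_' :: b :: pvSub2 r
    else
      a :: pvSub2 (b :: r)

def case_converter_alt (class_name : String) : String :=
  let last := PySem.List.pyGetD class_name.toList (-1) ' '
  let snake : List Char :=
    (pvSub2 (pvSub1 class_name.toList)).map PySem.Chars.lowerChar
  if last = 'y' then String.ofList (snake.dropLast ++ ['i', 'e', 's'])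
  else if last = 's' then String.ofList (snake ++ ['e', 's'])
  else String.ofList (snake ++ ['s'])

-- ===== PRECONDITION & SPEC =====
-- Pre_ excludes only the empty string, on which A raises IndexError (class_name[-1]).
def Pre_case_converter (class_name : String) : Prop := class_name ≠ ""
instance (class_name : String) : Decidable (Pre_case_converter class_name) := by
  unfold Pre_case_converter; infer_instance
def pvWitness_case_converter : String := "UserProfile"
def Spec_case_converter (class_name : String) (out : String) : Prop := out = case_converter_alt class_name
instance (class_name : String) (out : String) : Decidable (Spec_case_converter class_name out) := by unfold Spec_case_converter; infer_instance

-- ===== CLAIM (what is proved, stated in full; the proofs are below) =====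
def Claim_equal_case_converter : Prop := ∀ (class_name : String), Dom_case_converter class_name → Pre_case_converter class_name → Spec_case_converter class_name (case_converter class_name)

-- ===== LEMMAS AND PROOFS =====

-- shorthand used throughout the proofs
def pvUp (c : Char) : Bool := PySem.Chars.isupper c
def pvLow (c : Char) : Char := PySem.Chars.lowerChar c

-- the per-character contribution of A's loop body at enumerated position p
def pvPiece (cs : List Char) (p : Int × Char) : List Char :=
  if p.1 ≠ 0 ∧ PySem.Chars.isupper p.2 = true then
    if PySem.Chars.isupper (PySem.List.pyGetD cs (p.1 - 1) ' ') &&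
        (decide ((cs.length : Int) ≤ p.1 + 1) ||
          PySem.Chars.isupper (PySem.List.pyGetD cs (p.1 + 1) ' ')) then
      [PySem.Chars.lowerChar p.2]
    else
      ['_', PySem.Chars.lowerChar p.2]
  else [PySem.Chars.lowerChar p.2]

-- windowed (previous-character-carrying) forms of the two regex passes
def pvGo1 (p : Char) : List Char → List Char
  | [] => []
  | c :: r =>
    (if pvUp p = false ∧ pvUp c = true then ['_'] else []) ++ c :: pvGo1 c r

def pvGo2 (p : Char) : List Char → List Char
  | [] => []
  | c :: r =>
    (if pvUp p = true ∧ pvUp c = true ∧ pvLookNonUp r = true then ['_'] else []) ++ c :: pvGo2 c r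

def pvIns1 : List Char → List Char
  | [] => []
  | c :: r => c :: pvGo1 c r

def pvIns2 : List Char → List Char
  | [] => []
  | c :: r => c :: pvGo2 c r

-- the common underscore-insertion rule, already lowercased
def pvSpec (p : Char) : List Char → List Char
  | [] => []
  | c :: r =>
    (if pvUp c = true ∧ (pvUp p = false ∨ pvLookNonUp r = true) then ['_'] else []) ++
      pvLow c :: pvSpec c r

theorem pvGo1_of_up {p : Char} (h : pvUp p = true) (r : List Char) : pvGo1 p r = pvIns1 r := by
  cases r with
  | nil => rfl
  | cons c r => simp [pvGo1, pvIns1, h]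

theorem pvSub1_eq (l : List Char) : pvSub1 l = pvIns1 l := by
  induction l using pvSub1.induct with
  | case1 => rfl
  | case2 c => simp [pvSub1, pvIns1, pvGo1]
  | case3 a b r h ih =>
    have ha : pvUp a = false := by
      have h' := h.1
      exact (Bool.not_eq_true _).mp h'
    have hb : pvUp b = true := h.2
    have h1 : pvSub1 (a :: b :: r) = a :: '_' :: b :: pvSub1 r := by
      rw [pvSub1, if_pos h]
    rw [h1, ih, ← pvGo1_of_up hb r]
    have h2 : pvGo1 a (b :: r) = '_' :: b :: pvGo1 b r := by
      rw [pvGo1, if_pos ⟨ha, hb⟩]; rfl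
    simp only [pvIns1, h2]
  | case4 a b r h ih =>
    have h1 : pvSub1 (a :: b :: r) = a :: pvSub1 (b :: r) := by
      rw [pvSub1, if_neg h]
    rw [h1, ih]
    have h2 : pvGo1 a (b :: r) = b :: pvGo1 b r := by
      have hcond : ¬ (pvUp a = false ∧ pvUp b = true) :=
        fun hx => h ⟨(Bool.not_eq_true _).mpr hx.1, hx.2⟩
      rw [pvGo1, if_neg hcond]; rfl
    simp only [pvIns1, h2]

theorem pvGo2_of_look {p : Char} {r : List Char} (h : pvLookNonUp r = true ∨ r = []) :
    pvGo2 p r = pvIns2 r := by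
  cases r with
  | nil => rfl
  | cons c r =>
    have hc : pvUp c = false := by
      rcases h with h | h
      · simpa [pvLookNonUp, pvUp] using h
      · simp at h
    simp [pvGo2, pvIns2, hc]

theorem pvSub2_eq (l : List Char) : pvSub2 l = pvIns2 l := by
  induction l using pvSub2.induct with
  | case1 => rfl
  | case2 c => simp [pvSub2, pvIns2, pvGo2]
  | case3 a b r h ih =>
    have h1 : pvSub2 (a :: b :: r) = a :: '_' :: b :: pvSub2 r := by
      rw [pvSub2, if_pos h]
    have h' : pvUp a = true ∧ pvUp b = true ∧ pvLookNonUp r = true := h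
    rw [h1, ih, ← pvGo2_of_look (p := b) (Or.inl h'.2.2)]
    have h2 : pvGo2 a (b :: r) = '_' :: b :: pvGo2 b r := by
      rw [pvGo2, if_pos h']; rfl
    simp only [pvIns2, h2]
  | case4 a b r h ih =>
    have h1 : pvSub2 (a :: b :: r) = a :: pvSub2 (b :: r) := by
      rw [pvSub2, if_neg h]
    have h' : ¬ (pvUp a = true ∧ pvUp b = true ∧ pvLookNonUp r = true) := h
    rw [h1, ih]
    have h2 : pvGo2 a (b :: r) = b :: pvGo2 b r := by
      rw [pvGo2, if_neg h']; rfl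
    simp only [pvIns2, h2]

theorem pvLook_go1 {c : Char} (h : pvUp c = true) (r : List Char) :
    pvLookNonUp (pvGo1 c r) = pvLookNonUp r := by
  cases r with
  | nil => rfl
  | cons d r => simp [pvGo1, pvLookNonUp, h]

theorem pvGo2_go1 (r : List Char) (p : Char) :
    (pvGo2 p (pvGo1 p r)).map PySem.Chars.lowerChar = pvSpec p r := by
  induction r generalizing p with
  | nil => rfl
  | cons c r ih =>
    cases huc : pvUp c with
    | false =>
      have hg : pvGo1 p (c :: r) = c :: pvGo1 c r := by
        rw [pvGo1, if_neg (by simp [huc])]; rfl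
      rw [hg]
      simp [pvGo2, huc, pvSpec, ih, pvLow]
    | true =>
      cases hup : pvUp p with
      | false =>
        have hg : pvGo1 p (c :: r) = '_' :: c :: pvGo1 c r := by
          rw [pvGo1, if_pos ⟨hup, huc⟩]; rfl
        have hbar : pvUp '_' = false := by decide
        have hlowbar : PySem.Chars.lowerChar '_' = '_' := by decide
        rw [hg]
        simp [pvGo2, hbar, pvSpec, hup, huc, hlowbar, ih, pvLow]
      | true =>
        have hg : pvGo1 p (c :: r) = c :: pvGo1 c r := by
          rw [pvGo1, if_neg (by simp [hup])]; rfl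
        rw [hg]
        have hlowbar : PySem.Chars.lowerChar '_' = '_' := by decide
        cases hlk : pvLookNonUp r with
        | false =>
          simp [pvGo2, pvSpec, hup, huc, pvLook_go1 huc, hlk, ih, pvLow, hlowbar]
        | true =>
          simp [pvGo2, pvSpec, hup, huc, pvLook_go1 huc, hlk, ih, pvLow, hlowbar]

-- A's foldl accumulates exactly the concatenation of the per-position pieces
theorem pvFoldl_pieces (cs : List Char) (l : List (Int × Char)) (acc : List Char) :
    l.foldl
      (fun (acc : List Char) p =>
        if p.1 ≠ 0 ∧ PySem.Chars.isupper p.2 = true then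
          let flag : Bool :=
            decide ((cs.length : Int) ≤ p.1 + 1) ||
              PySem.Chars.isupper (PySem.List.pyGetD cs (p.1 + 1) ' ')
          let prevChar := PySem.List.pyGetD cs (p.1 - 1) ' '
          if PySem.Chars.isupper prevChar && flag then
            acc ++ [PySem.Chars.lowerChar p.2]
          else
            acc ++ ['_', PySem.Chars.lowerChar p.2]
        else
          acc ++ [PySem.Chars.lowerChar p.2]) acc
      = acc ++ l.flatMap (pvPiece cs) := by
  induction l generalizing acc with
  | nil => simp
  | cons x l ih =>
    rw [List.foldl_cons, ih, List.flatMap_cons]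
    have : (if x.1 ≠ 0 ∧ PySem.Chars.isupper x.2 = true then
          if PySem.Chars.isupper (PySem.List.pyGetD cs (x.1 - 1) ' ') &&
              (decide ((cs.length : Int) ≤ x.1 + 1) ||
                PySem.Chars.isupper (PySem.List.pyGetD cs (x.1 + 1) ' ')) then
            acc ++ [PySem.Chars.lowerChar x.2]
          else
            acc ++ ['_', PySem.Chars.lowerChar x.2]
        else
          acc ++ [PySem.Chars.lowerChar x.2]) = acc ++ pvPiece cs x := by
      unfold pvPiece; split_ifs <;> simp
    simp only at this ⊢
    rw [this, List.append_assoc]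

theorem pvPiece_nonup {cs : List Char} {c : Char} (h : pvUp c = false) (j : Int) :
    pvPiece cs (j, c) = [PySem.Chars.lowerChar c] := by
  simp [pvPiece, pvUp] at h ⊢
  intro _; simp [h]

theorem pvEnumerate_append {α : Type} (xs ys : List α) (s : Int) :
    PySem.List.enumerate (xs ++ ys) s =
      PySem.List.enumerate xs s ++ PySem.List.enumerate ys (s + xs.length) := by
  induction xs generalizing s with
  | nil => simp [PySem.List.enumerate_nil]
  | cons x xs ih =>
    simp [PySem.List.enumerate_cons, ih]
    ring_nf

theorem pvDrop_getD {cs : List Char} {i : Nat} {p : Char} {r : List Char}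
    (h : cs.drop i = p :: r) : cs.getD i ' ' = p := by
  have h0 : (cs.drop i)[0]? = some p := by rw [h]; rfl
  rw [List.getElem?_drop] at h0
  simp only [Nat.add_zero] at h0
  simp [List.getD, h0]

theorem pvDrop_succ {cs : List Char} {i : Nat} {p : Char} {r : List Char}
    (h : cs.drop i = p :: r) : cs.drop (i + 1) = r := by
  have ht : (cs.drop i).tail = cs.drop (i + 1) := List.tail_drop ..
  rw [h] at ht
  simpa using ht.symm

theorem pvDrop_len {cs : List Char} {i : Nat} {p : Char} {r : List Char}
    (h : cs.drop i = p :: r) : cs.length = i + 1 + r.length := by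
  have h1 : (cs.drop i).length = cs.length - i := List.length_drop ..
  rw [h] at h1
  have h2 : i < cs.length := by
    by_contra hle
    rw [List.drop_eq_nil_of_le (Nat.le_of_not_lt hle)] at h
    simp at h
  simp at h1
  omega

-- MAIN: A's indexed pieces over a true suffix of cs equal the windowed rule
theorem pvMain (cs : List Char) (r : List Char) (i : Nat) (p : Char)
    (h : cs.drop i = p :: r) :
    (PySem.List.enumerate r ((i : Int) + 1)).flatMap (pvPiece cs) = pvSpec p r := by
  induction r generalizing i p with
  | nil => simp [PySem.List.enumerate_nil, pvSpec]
  | cons c r' ih =>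
    have hdrop1 : cs.drop (i + 1) = c :: r' := pvDrop_succ h
    have hp : cs.getD i ' ' = p := pvDrop_getD h
    have hlen : cs.length = i + 2 + r'.length := by
      have := pvDrop_len hdrop1; omega
    have hpiece : pvPiece cs ((i : Int) + 1, c) =
        (if pvUp c = true ∧ (pvUp p = false ∨ pvLookNonUp r' = true) then ['_'] else []) ++
          [pvLow c] := by
      by_cases hc : pvUp c = true
      · have hprev : PySem.List.pyGetD cs ((i : Int) + 1 - 1) ' ' = p := by
          have : ((i : Int) + 1 - 1) = ((i : Nat) : Int) := by ring
          rw [this, PySem.List.pyGetD_natCast, hp]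
        cases r' with
        | nil =>
          have hflag : decide ((cs.length : Int) ≤ (i : Int) + 1 + 1) = true := by
            simp [hlen]; push_cast; omega
          simp only [pvPiece, hprev, hflag, Bool.true_or]
          have hne : ((i : Int) + 1) ≠ 0 := by omega
          simp only [hne, pvUp] at hc ⊢
          simp [hc, pvLookNonUp, pvLow, pvUp]
          cases hup : PySem.Chars.isupper p <;> simp [hup] <;> omega
        | cons d r'' =>
          have hlen2 : cs.length = i + 3 + r''.length := by
            have := pvDrop_len (pvDrop_succ hdrop1); omega
          have hflag : decide ((cs.length : Int) ≤ (i : Int) + 1 + 1) = false := by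
            simp [hlen2]; omega
          have hd : PySem.List.pyGetD cs ((i : Int) + 1 + 1) ' ' = d := by
            have : ((i : Int) + 1 + 1) = (((i + 2 : Nat)) : Int) := by push_cast; ring
            rw [this, PySem.List.pyGetD_natCast]
            exact pvDrop_getD (pvDrop_succ hdrop1)
          simp only [pvPiece, hprev, hflag, hd, Bool.false_or]
          have hne : ((i : Int) + 1) ≠ 0 := by omega
          simp only [hne, pvUp] at hc ⊢
          simp [hc, pvLookNonUp, pvLow, pvUp]
          cases hup : PySem.Chars.isupper p <;>
            cases hud : PySem.Chars.isupper d <;> simp [hup, hud] <;> omega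
      · have hc' : pvUp c = false := by
          cases hv : pvUp c
          · rfl
          · exact absurd hv hc
        rw [pvPiece_nonup hc']
        simp [hc', pvLow]
    rw [PySem.List.enumerate_cons, List.flatMap_cons]
    have hih := ih (i := i + 1) (p := c) hdrop1
    have hcast : ((i : Int) + 1 + 1) = (((i + 1 : Nat) : Int) + 1) := by push_cast; ring
    rw [hcast, hih, hpiece]
    simp [pvSpec]

theorem pvSpec_ne_nil (p c : Char) (l : List Char) : pvSpec p (c :: l) ≠ [] := by
  simp [pvSpec]

-- MAINy: same, when the loop runs over the suffix with its (non-upper) last char removed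
theorem pvMainY (cs : List Char) (r : List Char) (i : Nat) (p c : Char)
    (hc : pvUp c = false) (h : cs.drop i = p :: (r ++ [c])) :
    (PySem.List.enumerate r ((i : Int) + 1)).flatMap (pvPiece cs) =
      (pvSpec p (r ++ [c])).dropLast := by
  induction r generalizing i p with
  | nil =>
    simp [PySem.List.enumerate_nil, pvSpec, hc]
  | cons d r' ih =>
    have hdrop1 : cs.drop (i + 1) = d :: (r' ++ [c]) := pvDrop_succ h
    have hp : cs.getD i ' ' = p := pvDrop_getD h
    have hpiece : pvPiece cs ((i : Int) + 1, d) =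
        (if pvUp d = true ∧ (pvUp p = false ∨ pvLookNonUp (r' ++ [c]) = true) then ['_'] else []) ++
          [pvLow d] := by
      by_cases hd : pvUp d = true
      · have hprev : PySem.List.pyGetD cs ((i : Int) + 1 - 1) ' ' = p := by
          have : ((i : Int) + 1 - 1) = ((i : Nat) : Int) := by ring
          rw [this, PySem.List.pyGetD_natCast, hp]
        have hlen : cs.length = i + 2 + r'.length + 1 := by
          have := pvDrop_len hdrop1; simp at this; omega
        have hflag : decide ((cs.length : Int) ≤ (i : Int) + 1 + 1) = false := by
          simp [hlen]; omega
        have hnext : PySem.List.pyGetD cs ((i : Int) + 1 + 1) ' ' = (r' ++ [c]).getD 0 ' ' := by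
          have hcast : ((i : Int) + 1 + 1) = (((i + 2 : Nat)) : Int) := by push_cast; ring
          rw [hcast, PySem.List.pyGetD_natCast]
          cases hr' : r' ++ [c] with
          | nil => exact absurd hr' (by simp)
          | cons e t =>
            have hdd : cs.drop (i + 2) = e :: t := by
              have := pvDrop_succ hdrop1; rw [hr'] at this; exact this
            rw [List.getD_cons_zero]
            exact pvDrop_getD hdd
        have hlook : PySem.Chars.isupper ((r' ++ [c]).getD 0 ' ') = !pvLookNonUp (r' ++ [c]) := by
          cases r' with
          | nil =>
            simp only [pvUp] at hc
            simp [pvLookNonUp, hc]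
          | cons e t => simp [pvLookNonUp, pvUp]
        simp only [pvPiece, hprev, hflag, hnext, Bool.false_or, hlook]
        have hne : ((i : Int) + 1) ≠ 0 := by omega
        simp only [hne, pvUp] at hd ⊢
        simp [hd, pvLow, pvUp]
        cases hup : PySem.Chars.isupper p <;>
          cases hlk : pvLookNonUp (r' ++ [c]) <;> simp [hup, hlk] <;> omega
      · have hd' : pvUp d = false := by
          cases hv : pvUp d
          · rfl
          · exact absurd hv hd
        rw [pvPiece_nonup hd']
        simp [hd', pvLow]
    rw [PySem.List.enumerate_cons, List.flatMap_cons]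
    have hih := ih (i := i + 1) (p := d) hdrop1
    have hcast : ((i : Int) + 1 + 1) = (((i + 1 : Nat) : Int) + 1) := by push_cast; ring
    rw [hcast, hih, hpiece]
    cases r' with
    | nil =>
      simp [pvSpec, hc]
    | cons e t =>
      have hx : pvSpec d (e :: (t ++ [c])) ≠ [] := pvSpec_ne_nil d e (t ++ [c])
      simp only [List.cons_append]
      conv_rhs => rw [pvSpec]
      rw [List.dropLast_append_of_ne_nil (by simp : (pvLow d :: pvSpec d (e :: (t ++ [c]))) ≠ [])]
      rw [List.dropLast_cons_of_ne_nil hx]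
      simp

-- the suffix characters contribute themselves (they are lowercase)
theorem pvSuffix_ies (cs : List Char) (s : Int) :
    (PySem.List.enumerate ['i', 'e', 's'] s).flatMap (pvPiece cs) = ['i', 'e', 's'] := by
  have hi : pvUp 'i' = false := by decide
  have he : pvUp 'e' = false := by decide
  have hs : pvUp 's' = false := by decide
  simp [PySem.List.enumerate_cons, PySem.List.enumerate_nil,
    pvPiece_nonup hi, pvPiece_nonup he, pvPiece_nonup hs]
  decide

theorem pvSuffix_es (cs : List Char) (s : Int) :
    (PySem.List.enumerate ['e', 's'] s).flatMap (pvPiece cs) = ['e', 's'] := by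
  have he : pvUp 'e' = false := by decide
  have hs : pvUp 's' = false := by decide
  simp [PySem.List.enumerate_cons, PySem.List.enumerate_nil,
    pvPiece_nonup he, pvPiece_nonup hs]
  decide

theorem pvSuffix_s (cs : List Char) (s : Int) :
    (PySem.List.enumerate ['s'] s).flatMap (pvPiece cs) = ['s'] := by
  have hs : pvUp 's' = false := by decide
  simp [PySem.List.enumerate_cons, PySem.List.enumerate_nil, pvPiece_nonup hs]
  decide

-- B's snake list in closed, windowed form
theorem pvSnake_eq (c0 : Char) (rest : List Char) :
    (pvSub2 (pvSub1 (c0 :: rest))).map PySem.Chars.lowerChar =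
      PySem.Chars.lowerChar c0 :: pvSpec c0 rest := by
  rw [pvSub1_eq]
  show (pvSub2 (c0 :: pvGo1 c0 rest)).map PySem.Chars.lowerChar = _
  rw [pvSub2_eq]
  show (c0 :: pvGo2 c0 (pvGo1 c0 rest)).map PySem.Chars.lowerChar = _
  rw [List.map_cons, pvGo2_go1]

theorem pvMain0 (cs r : List Char) (p : Char) (h : cs = p :: r) :
    (PySem.List.enumerate r 1).flatMap (pvPiece cs) = pvSpec p r := by
  have h0 := pvMain cs r 0 p (by simpa using h)
  norm_num at h0
  exact h0

theorem pvMainY0 (cs r : List Char) (p c : Char) (hc : pvUp c = false)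
    (h : cs = p :: (r ++ [c])) :
    (PySem.List.enumerate r 1).flatMap (pvPiece cs) = (pvSpec p (r ++ [c])).dropLast := by
  have h0 := pvMainY cs r 0 p c hc (by simpa using h)
  norm_num at h0
  exact h0

-- ===== VERDICT (by name: the statement is the Claim_ definition above) =====
theorem case_converter_spec : Claim_equal_case_converter := by
  intro class_name _ hpre
  unfold Spec_case_converter
  have hne : class_name.toList ≠ [] := by
    intro h
    apply hpre
    have h2 := congrArg String.ofList h
    simpa using h2
  obtain ⟨c0, rest, hsplit⟩ : ∃ a l, class_name.toList = a :: l := by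
    cases h : class_name.toList with
    | nil => exact absurd h hne
    | cons a l => exact ⟨a, l, rfl⟩
  unfold case_converter case_converter_alt
  simp only [hsplit]
  rw [pvSnake_eq, pvFoldl_pieces, List.nil_append]
  have hpiece0 : ∀ (l : List Char) c, pvPiece l (0, c) = [PySem.Chars.lowerChar c] := by
    intro l c; simp [pvPiece]
  by_cases hy : PySem.List.pyGetD (c0 :: rest) (-1) ' ' = 'y'
  · rw [if_pos hy, if_pos hy, PySem.List.slice_to_neg_one]
    by_cases hrne : rest = []
    · subst hrne
      have h1 : ([c0] : List Char).dropLast = [] := rfl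
      rw [h1, List.nil_append, pvSuffix_ies]
      simp [pvSpec]
    · have hlast : rest.getLast hrne = 'y' := by
        have h1 : PySem.List.pyGetD (c0 :: rest) (-1) ' ' =
            (c0 :: rest).getLast (by simp) :=
          PySem.List.pyGetD_neg_one _ ' ' (by simp)
        rw [hy] at h1
        rw [List.getLast_cons hrne] at h1
        exact h1.symm
      have hsplit2 : rest.dropLast ++ ['y'] = rest := by
        conv_rhs => rw [← List.dropLast_concat_getLast hrne]
        rw [hlast]
      rw [List.dropLast_cons_of_ne_nil hrne, List.cons_append,
        PySem.List.enumerate_cons, List.flatMap_cons, hpiece0,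
        pvEnumerate_append, List.flatMap_append]
      simp only [zero_add]
      rw [pvSuffix_ies,
        pvMainY0 (c0 :: rest) rest.dropLast c0 'y' (by decide) (by rw [hsplit2]),
        hsplit2]
      obtain ⟨r0, rr, hr⟩ : ∃ a l, rest = a :: l := by
        cases rest with
        | nil => exact absurd rfl hrne
        | cons a l => exact ⟨a, l, rfl⟩
      have hspecne : pvSpec c0 rest ≠ [] := by
        rw [hr]; exact pvSpec_ne_nil c0 r0 rr
      rw [List.dropLast_cons_of_ne_nil hspecne]
      simp
  · rw [if_neg hy, if_neg hy]
    by_cases hs : PySem.List.pyGetD (c0 :: rest) (-1) ' ' = 's'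
    · rw [if_pos hs, if_pos hs]
      rw [List.cons_append, PySem.List.enumerate_cons, List.flatMap_cons, hpiece0,
        pvEnumerate_append, List.flatMap_append]
      simp only [zero_add]
      rw [pvSuffix_es, pvMain0 (c0 :: rest) rest c0 rfl]
      simp
    · rw [if_neg hs, if_neg hs]
      rw [List.cons_append, PySem.List.enumerate_cons, List.flatMap_cons, hpiece0,
        pvEnumerate_append, List.flatMap_append]
      simp only [zero_add]
      rw [pvSuffix_s, pvMain0 (c0 :: rest) rest c0 rfl]
      simp
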